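-- pv_equiv track=rewrite | github.com/hiroshisiq/problem_solving | problems/kattis/ferryloading4.py | get_number_of_crosses
-- ===== SOURCE A (Python) =====
-- from collections import namedtuple, deque
-- from typing import Tuple, List
--
-- Car = namedtuple('Car', ['length_in_cm', 'side'])
--
-- def load_ferry(queue: deque, ferry_length):
--     load = 0
--     while queue:
--         # Try to load next car in ferry
--         load += queue[0].length_in_cm
--
--         # If not exceeded limit load, else, break
--         if load <= ferry_length:
--             queue.popleft()
--         else:
--             break
--
-- def get_number_of_crosses(ferry_length_in_cm: int, car_list: List[Car], number_of_cars: int) -> int: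
--     queues = {'left': deque(), 'right': deque()}
--     [queues[car.side].append(car) for car in car_list]
--
--     counter = 0
--     while any(queues.values()):
--         load_ferry(queues['left'], ferry_length_in_cm)
--         counter += 1
--
--         if not any(queues.values()):
--             break
--
--         load_ferry(queues['right'], ferry_length_in_cm)
--         counter += 1
--
--     return counter
-- ===== SOURCE B (Python) =====
-- def get_number_of_crosses(ferry_length_in_cm, car_list, number_of_cars):
--     # Per side, count greedy ferry trips in one scan; then combine with a closed form.
--     lengths = {'left': [], 'right': []}
--     for car in car_list:
--         lengths[car[1]].append(car[0])  # KeyError on an unknown side, as in A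
--
--     def trips(ls):
--         n = load = 0
--         for x in ls:
--             if n == 0 or load + x > ferry_length_in_cm:
--                 n, load = n + 1, x
--             else:
--                 load += x
--         return n
--
--     l, r = trips(lengths['left']), trips(lengths['right'])
--     if l == 0 and r == 0:
--         return 0
--     return 2 * l - 1 if l > r else 2 * r
-- ===== Notes on version B (the rewrite author's own statement) =====
-- stated objective: simpler
-- what changed: B replaces A's mutable-deque simulation of alternating crossings by a single greedy scan per side that counts ferry trips, then combines the two counts with the closed form (0 if both 0, 2*l-1 if l>r, else 2*r).
import Mathlib
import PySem

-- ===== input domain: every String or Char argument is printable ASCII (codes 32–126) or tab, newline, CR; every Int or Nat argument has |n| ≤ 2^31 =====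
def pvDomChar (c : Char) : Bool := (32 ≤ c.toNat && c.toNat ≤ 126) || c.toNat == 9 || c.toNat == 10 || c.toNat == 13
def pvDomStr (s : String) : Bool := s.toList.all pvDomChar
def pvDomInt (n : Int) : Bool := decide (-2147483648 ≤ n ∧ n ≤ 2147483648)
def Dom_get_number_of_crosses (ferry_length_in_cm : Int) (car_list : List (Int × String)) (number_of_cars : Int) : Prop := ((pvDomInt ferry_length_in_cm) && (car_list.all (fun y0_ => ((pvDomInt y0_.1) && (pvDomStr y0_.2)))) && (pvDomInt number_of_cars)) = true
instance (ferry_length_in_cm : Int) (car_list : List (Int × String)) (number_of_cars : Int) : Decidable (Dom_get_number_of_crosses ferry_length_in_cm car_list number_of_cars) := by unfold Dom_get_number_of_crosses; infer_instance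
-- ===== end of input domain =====

-- ===== PORT A =====
-- B replaces A's deque simulation by per-side greedy trip counts combined with a closed form (same cost, simpler).
-- Side effects: A mutates its local deques only; the argument list is not mutated.

-- load_ferry: pop the maximal prefix of the queue whose cumulative length fits the ferry; returns the rest.
def pvLoadFerry (ferry : Int) (load : Int) : List (Int × String) → List (Int × String)
  | [] => []
  | c :: rest =>
      if load + c.1 ≤ ferry then pvLoadFerry ferry (load + c.1) rest
      else c :: rest

-- the outer while-loop; `fuel` only makes the recursion total (Pre_ guarantees it is never exhausted:
-- each executed round removes at least one car, so car_list.length + 1 rounds suffice).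
def pvLoop (ferry : Int) : Nat → List (Int × String) → List (Int × String) → Int → Int
  | 0, _, _, c => c
  | fuel + 1, L, R, c =>
      if L = [] ∧ R = [] then c
      else
        let L' := pvLoadFerry ferry 0 L
        if L' = [] ∧ R = [] then c + 1
        else pvLoop ferry fuel L' (pvLoadFerry ferry 0 R) (c + 2)

def get_number_of_crosses (ferry_length_in_cm : Int) (car_list : List (Int × String)) (number_of_cars : Int) : Int :=
  -- queues[car.side].append(car); a side other than 'left'/'right' raises KeyError in Python (excluded by Pre_),
  -- here the appending fold drops such a car.
  let q := car_list.foldl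
    (fun (q : List (Int × String) × List (Int × String)) c =>
      if c.2 = "left" then (q.1 ++ [c], q.2)
      else if c.2 = "right" then (q.1, q.2 ++ [c])
      else q) ([], [])
  pvLoop ferry_length_in_cm (car_list.length + 1) q.1 q.2 0

-- ===== PORT B =====
-- lengths[car[1]].append(car[0]); an unknown side raises KeyError in Python (excluded by Pre_), here it is dropped.
def pvSideLengths (car_list : List (Int × String)) : List Int × List Int :=
  car_list.foldl
    (fun (q : List Int × List Int) c =>
      if c.2 = "left" then (q.1 ++ [c.1], q.2)
      else if c.2 = "right" then (q.1, q.2 ++ [c.1])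
      else q) ([], [])

def pvTrips (ferry : Int) (ls : List Int) : Int :=
  (ls.foldl
    (fun (s : Int × Int) x =>
      if s.1 = 0 ∨ s.2 + x > ferry then (s.1 + 1, x)
      else (s.1, s.2 + x)) (0, 0)).1

def get_number_of_crosses_alt (ferry_length_in_cm : Int) (car_list : List (Int × String)) (number_of_cars : Int) : Int :=
  let q := pvSideLengths car_list
  let l := pvTrips ferry_length_in_cm q.1
  let r := pvTrips ferry_length_in_cm q.2
  if l = 0 ∧ r = 0 then 0
  else if l > r then 2 * l - 1 else 2 * r

-- ===== PRECONDITION & SPEC =====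
-- Pre_ is exactly A's halting set: a car whose side is not 'left'/'right' makes A raise KeyError, and a car
-- longer than the ferry makes A's while-loop spin forever (load_ferry can never pop it).
def Pre_get_number_of_crosses (ferry_length_in_cm : Int) (car_list : List (Int × String)) (number_of_cars : Int) : Prop :=
  ∀ c ∈ car_list, c.1 ≤ ferry_length_in_cm ∧ (c.2 = "left" ∨ c.2 = "right")
instance (ferry_length_in_cm : Int) (car_list : List (Int × String)) (number_of_cars : Int) : Decidable (Pre_get_number_of_crosses ferry_length_in_cm car_list number_of_cars) := by unfold Pre_get_number_of_crosses; infer_instance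

def pvWitness_get_number_of_crosses : Int × (List (Int × String)) × Int := (10, [(4, "left"), (7, "right"), (6, "left")], 3)

def Spec_get_number_of_crosses (ferry_length_in_cm : Int) (car_list : List (Int × String)) (number_of_cars : Int) (out : Int) : Prop := out = get_number_of_crosses_alt ferry_length_in_cm car_list number_of_cars
instance (ferry_length_in_cm : Int) (car_list : List (Int × String)) (number_of_cars : Int) (out : Int) : Decidable (Spec_get_number_of_crosses ferry_length_in_cm car_list number_of_cars out) := by unfold Spec_get_number_of_crosses; infer_instance

-- ===== CLAIM (what is proved, stated in full; the proofs are below) =====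
def Claim_equal_get_number_of_crosses : Prop := ∀ (ferry_length_in_cm : Int) (car_list : List (Int × String)) (number_of_cars : Int), Dom_get_number_of_crosses ferry_length_in_cm car_list number_of_cars → Pre_get_number_of_crosses ferry_length_in_cm car_list number_of_cars → Spec_get_number_of_crosses ferry_length_in_cm car_list number_of_cars (get_number_of_crosses ferry_length_in_cm car_list number_of_cars)

-- ===== LEMMAS AND PROOFS =====

-- greedy trip count over an already-filtered (single-side) list: B's scan without the side test
def pvT (ferry : Int) (s : Int × Int) (cars : List (Int × String)) : Int :=
  (cars.foldl
    (fun (s : Int × Int) c =>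
      if s.1 = 0 ∨ s.2 + c.1 > ferry then (s.1 + 1, c.1)
      else (s.1, s.2 + c.1)) s).1

lemma pvT_mono (ferry : Int) (s : Int × Int) (cars : List (Int × String)) :
    s.1 ≤ pvT ferry s cars := by
  induction cars generalizing s with
  | nil => simp [pvT]
  | cons c cs ih =>
      simp only [pvT, List.foldl_cons]
      split_ifs with h
      · exact le_trans (by omega) (ih _)
      · exact ih _

lemma pvT_nonneg (ferry : Int) (cars : List (Int × String)) : 0 ≤ pvT ferry (0, 0) cars :=
  pvT_mono ferry (0, 0) cars

lemma pvLoadFerry_zero_cons (ferry : Int) (c : Int × String) (cs : List (Int × String))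
    (hfit : c.1 ≤ ferry) : pvLoadFerry ferry 0 (c :: cs) = pvLoadFerry ferry c.1 cs := by
  simp [pvLoadFerry, hfit]

lemma pvT_start (ferry : Int) (c : Int × String) (cs : List (Int × String)) :
    pvT ferry (0, 0) (c :: cs) = pvT ferry (1, c.1) cs := by
  simp [pvT]

-- key scan lemma: from a running state with n ≥ 1, the scan counts the trips of the yet-unloaded suffix
lemma pvT_loadFerry (ferry : Int) (cars : List (Int × String)) :
    ∀ n load : Int, 1 ≤ n →
      pvT ferry (n, load) cars = n + pvT ferry (0, 0) (pvLoadFerry ferry load cars) := by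
  induction cars with
  | nil => intro n load _; simp [pvT, pvLoadFerry]
  | cons c cs ih =>
      intro n load hn
      by_cases hle : load + c.1 ≤ ferry
      · have h1 : ¬ (n = 0 ∨ load + c.1 > ferry) := by omega
        simp only [pvT, List.foldl_cons, if_neg h1, pvLoadFerry, if_pos hle]
        exact ih n (load + c.1) hn
      · have h1 : n = 0 ∨ load + c.1 > ferry := by omega
        have e1 : pvT ferry (n, load) (c :: cs) = pvT ferry (n + 1, c.1) cs := by
          simp only [pvT, List.foldl_cons, if_pos h1]
        have e3 : pvLoadFerry ferry load (c :: cs) = c :: cs := by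
          simp [pvLoadFerry, hle]
        rw [e1, e3, pvT_start, ih (n + 1) c.1 (by omega), ih 1 c.1 (by omega)]
        ring

lemma pvT_cons (ferry : Int) (c : Int × String) (cs : List (Int × String)) :
    pvT ferry (0, 0) (c :: cs) = 1 + pvT ferry (0, 0) (pvLoadFerry ferry c.1 cs) := by
  rw [pvT_start]
  exact pvT_loadFerry ferry cs 1 c.1 (by omega)

lemma pvT_pos (ferry : Int) (c : Int × String) (cs : List (Int × String)) :
    1 ≤ pvT ferry (0, 0) (c :: cs) := by
  rw [pvT_cons]
  have := pvT_nonneg ferry (pvLoadFerry ferry c.1 cs)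
  omega

-- one whole ferry trip on a nonempty fitting queue: trips decrease by exactly one
lemma pvT_step (ferry : Int) (c : Int × String) (cs : List (Int × String)) (hfit : c.1 ≤ ferry) :
    pvT ferry (0, 0) (c :: cs) = 1 + pvT ferry (0, 0) (pvLoadFerry ferry 0 (c :: cs)) := by
  rw [pvT_cons, pvLoadFerry_zero_cons ferry c cs hfit]

lemma pvLoadFerry_sublist (ferry load : Int) (cars : List (Int × String)) :
    (pvLoadFerry ferry load cars).Sublist cars := by
  induction cars generalizing load with
  | nil => simp [pvLoadFerry]
  | cons c cs ih =>
      simp only [pvLoadFerry]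
      split_ifs with h
      · exact (ih (load + c.1)).trans (List.sublist_cons_self c cs)
      · exact List.Sublist.refl _

lemma pvLoadFerry_length_le (ferry load : Int) (cars : List (Int × String)) :
    (pvLoadFerry ferry load cars).length ≤ cars.length :=
  (pvLoadFerry_sublist ferry load cars).length_le

lemma pvLoadFerry_length_lt (ferry : Int) (c : Int × String) (cs : List (Int × String)) (hfit : c.1 ≤ ferry) :
    (pvLoadFerry ferry 0 (c :: cs)).length < (c :: cs).length := by
  rw [pvLoadFerry_zero_cons ferry c cs hfit]
  have := pvLoadFerry_length_le ferry c.1 cs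
  simp only [List.length_cons]
  omega

-- precondition is preserved by loading
lemma pvLoadFerry_fits (ferry load : Int) (cars : List (Int × String))
    (h : ∀ c ∈ cars, c.1 ≤ ferry) : ∀ c ∈ pvLoadFerry ferry load cars, c.1 ≤ ferry :=
  fun c hc => h c ((pvLoadFerry_sublist ferry load cars).mem hc)

-- the closed form B combines the two trip counts with
def pvF (l r : Int) : Int := if l = 0 ∧ r = 0 then 0 else if l > r then 2 * l - 1 else 2 * r

-- MAIN LOOP LEMMA: with enough fuel, A's loop adds pvF of the two greedy trip counts to the counter
lemma pvLoop_eq (ferry : Int) :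
    ∀ fuel : Nat, ∀ L R : List (Int × String), ∀ c : Int,
      (∀ x ∈ L, x.1 ≤ ferry) → (∀ x ∈ R, x.1 ≤ ferry) →
      L.length + R.length < fuel →
      pvLoop ferry fuel L R c = c + pvF (pvT ferry (0,0) L) (pvT ferry (0,0) R) := by
  intro fuel
  induction fuel with
  | zero => intro L R c _ _ h; omega
  | succ fuel ih =>
      intro L R c hL hR hlen
      by_cases hLR : L = [] ∧ R = []
      · obtain ⟨hL0, hR0⟩ := hLR
        subst hL0; subst hR0
        simp [pvLoop, pvF, pvT]
      · simp only [pvLoop, if_neg hLR]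
        by_cases hbrk : pvLoadFerry ferry 0 L = [] ∧ R = []
        · -- break after the left trip: R empty, L nonempty, exactly one left trip
          obtain ⟨hL', hR0⟩ := hbrk
          subst hR0
          obtain ⟨a, L0, rfl⟩ : ∃ a L0, L = a :: L0 := by
            cases L with
            | nil => exact absurd ⟨rfl, rfl⟩ hLR
            | cons a L0 => exact ⟨a, L0, rfl⟩
          have hfit : a.1 ≤ ferry := hL a (by simp)
          have h1 : pvT ferry (0,0) (a :: L0) = 1 := by
            rw [pvT_step ferry a L0 hfit, hL']
            simp [pvT]
          have hcond : pvLoadFerry ferry 0 (a :: L0) = [] ∧ ([] : List (Int × String)) = [] :=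
            ⟨hL', rfl⟩
          rw [if_pos hcond, h1]
          norm_num [pvT, pvF]
        · -- full round: each nonempty side loses exactly one trip, counter gains 2
          simp only [if_neg hbrk]
          have hfitL' := pvLoadFerry_fits ferry 0 L hL
          have hfitR' := pvLoadFerry_fits ferry 0 R hR
          have hlen' : (pvLoadFerry ferry 0 L).length + (pvLoadFerry ferry 0 R).length < fuel := by
            have h1 : (pvLoadFerry ferry 0 L).length ≤ L.length := pvLoadFerry_length_le ferry 0 L
            have h2 : (pvLoadFerry ferry 0 R).length ≤ R.length := pvLoadFerry_length_le ferry 0 R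
            cases L with
            | nil =>
                -- L empty: R nonempty, the right side strictly shrinks
                cases R with
                | nil => exact absurd ⟨rfl, rfl⟩ hLR
                | cons b R0 =>
                    have := pvLoadFerry_length_lt ferry b R0 (hR b (by simp))
                    simp only [pvLoadFerry, List.length_nil, List.length_cons] at *
                    omega
            | cons a L0 =>
                have := pvLoadFerry_length_lt ferry a L0 (hL a (by simp))
                simp only [List.length_cons] at *
                omega
          rw [ih (pvLoadFerry ferry 0 L) (pvLoadFerry ferry 0 R) (c + 2) hfitL' hfitR' hlen']
          -- arithmetic: pvF l r = 2 + pvF l' r' in this round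
          cases L with
          | nil =>
              cases R with
              | nil => exact absurd ⟨rfl, rfl⟩ hLR
              | cons b R0 =>
                  have hstep : pvT ferry (0,0) (b :: R0)
                      = 1 + pvT ferry (0,0) (pvLoadFerry ferry 0 (b :: R0)) :=
                    pvT_step ferry b R0 (hR b (by simp))
                  have hr' := pvT_nonneg ferry (pvLoadFerry ferry 0 (b :: R0))
                  have hLnil : pvLoadFerry ferry 0 ([] : List (Int × String)) = [] := by
                    simp [pvLoadFerry]
                  have hTnil : pvT ferry (0,0) ([] : List (Int × String)) = 0 := by
                    simp [pvT]
                  rw [hLnil, hstep, hTnil]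
                  simp only [pvF]
                  split_ifs <;> omega
          | cons a L0 =>
              have hstepL : pvT ferry (0,0) (a :: L0)
                  = 1 + pvT ferry (0,0) (pvLoadFerry ferry 0 (a :: L0)) :=
                pvT_step ferry a L0 (hL a (by simp))
              have hl' := pvT_nonneg ferry (pvLoadFerry ferry 0 (a :: L0))
              have hL'pos : pvLoadFerry ferry 0 (a :: L0) ≠ [] →
                  1 ≤ pvT ferry (0,0) (pvLoadFerry ferry 0 (a :: L0)) := by
                intro h
                cases hc : pvLoadFerry ferry 0 (a :: L0) with
                | nil => exact absurd hc h
                | cons x xs => exact pvT_pos ferry x xs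
              cases R with
              | nil =>
                  have hL'ne : pvLoadFerry ferry 0 (a :: L0) ≠ [] := fun h => hbrk ⟨h, rfl⟩
                  have := hL'pos hL'ne
                  have hRnil : pvLoadFerry ferry 0 ([] : List (Int × String)) = [] := by
                    simp [pvLoadFerry]
                  have hTnil : pvT ferry (0,0) ([] : List (Int × String)) = 0 := by
                    simp [pvT]
                  rw [hstepL, hRnil, hTnil]
                  simp only [pvF]
                  split_ifs <;> omega
              | cons b R0 =>
                  have hstepR : pvT ferry (0,0) (b :: R0)
                      = 1 + pvT ferry (0,0) (pvLoadFerry ferry 0 (b :: R0)) :=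
                    pvT_step ferry b R0 (hR b (by simp))
                  have hr' := pvT_nonneg ferry (pvLoadFerry ferry 0 (b :: R0))
                  rw [hstepL, hstepR]
                  simp only [pvF]
                  split_ifs <;> omega

-- B's scan over a side's lengths is the A-side scan over that side's cars
lemma pvTrips_eq_pvT (ferry : Int) (cars : List (Int × String)) :
    pvTrips ferry (cars.map (fun c => c.1)) = pvT ferry (0,0) cars := by
  unfold pvTrips pvT
  rw [List.foldl_map]

-- A's appending fold produces the two side-filtered lists
lemma pvFold_eq_filter (cars : List (Int × String)) :
    ∀ accL accR : List (Int × String),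
      cars.foldl
        (fun (q : List (Int × String) × List (Int × String)) c =>
          if c.2 = "left" then (q.1 ++ [c], q.2)
          else if c.2 = "right" then (q.1, q.2 ++ [c])
          else q) (accL, accR)
      = (accL ++ cars.filter (fun c => c.2 = "left"),
         accR ++ cars.filter (fun c => c.2 = "right")) := by
  induction cars with
  | nil => simp
  | cons c cs ih =>
      intro accL accR
      simp only [List.foldl_cons, List.filter_cons]
      by_cases h1 : c.2 = "left"
      · have h2 : ¬ c.2 = "right" := by rw [h1]; decide
        simp [h1, h2, ih]
      · by_cases h2 : c.2 = "right"
        · simp [h1, h2, ih]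
        · simp [h1, h2, ih]

-- B's splitting fold is A's with the lengths projected out
lemma pvSideLengths_eq_filter (cars : List (Int × String)) :
    ∀ accL accR : List Int,
      cars.foldl
        (fun (q : List Int × List Int) c =>
          if c.2 = "left" then (q.1 ++ [c.1], q.2)
          else if c.2 = "right" then (q.1, q.2 ++ [c.1])
          else q) (accL, accR)
      = (accL ++ (cars.filter (fun c => c.2 = "left")).map (fun c => c.1),
         accR ++ (cars.filter (fun c => c.2 = "right")).map (fun c => c.1)) := by
  induction cars with
  | nil => simp
  | cons c cs ih =>
      intro accL accR
      simp only [List.foldl_cons, List.filter_cons]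
      by_cases h1 : c.2 = "left"
      · have h2 : ¬ c.2 = "right" := by rw [h1]; decide
        simp [h1, h2, ih]
      · by_cases h2 : c.2 = "right"
        · simp [h1, h2, ih]
        · simp [h1, h2, ih]

-- disjoint filters cannot jointly exceed the length
lemma pvFilter_len (cars : List (Int × String)) :
    (cars.filter (fun c => c.2 = "left")).length
      + (cars.filter (fun c => c.2 = "right")).length ≤ cars.length := by
  induction cars with
  | nil => simp
  | cons c cs ih =>
      simp only [List.filter_cons]
      by_cases h1 : c.2 = "left"
      · simp [h1]; omega
      · by_cases h2 : c.2 = "right" <;> simp [h1, h2] <;> omega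

lemma pvFilter_fits (ferry : Int) (p : Int × String → Bool) (cars : List (Int × String))
    (h : ∀ c ∈ cars, c.1 ≤ ferry) : ∀ c ∈ cars.filter p, c.1 ≤ ferry :=
  fun c hc => h c (List.mem_of_mem_filter hc)

-- ===== VERDICT (by name: the statement is the Claim_ definition above) =====
theorem get_number_of_crosses_spec : Claim_equal_get_number_of_crosses := by
  intro ferry cars n _ hpre
  unfold Spec_get_number_of_crosses get_number_of_crosses get_number_of_crosses_alt pvSideLengths
  rw [pvFold_eq_filter cars [] [], pvSideLengths_eq_filter cars [] []]
  simp only [List.nil_append]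
  have hfit : ∀ c ∈ cars, c.1 ≤ ferry := fun c hc => (hpre c hc).1
  rw [pvLoop_eq ferry (cars.length + 1)
        (cars.filter (fun c => c.2 = "left")) (cars.filter (fun c => c.2 = "right")) 0
        (pvFilter_fits ferry _ cars hfit) (pvFilter_fits ferry _ cars hfit)
        (by have := pvFilter_len cars; omega)]
  rw [pvTrips_eq_pvT, pvTrips_eq_pvT]
  simp [pvF]
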